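-- pv_equiv track=rewrite | github.com/denpth/C950_Task2 | load_package.py | get_address_id
-- ===== SOURCE A (Python) =====
-- def get_address_id(address, address_list):
--     """Finds the index (ID) for a given address string."""
--     # Handle special case for hub address
--     if "4001 South 700 East" in address or "4001 S 700 E" in address:
--         return 0  # Hub is always index 0
--
--     # Clean the input address for better matching
--     address_clean = address.strip().lower()
--
--     for i, addr in enumerate(address_list):
--         addr_clean = addr.strip().lower()
--         # Try substring match in both directions
--         if address_clean in addr_clean or addr_clean in address_clean:
--             return i
--
--     # Special handling for common address variations
--     address_parts = address_clean.split()
--     for i, addr in enumerate(address_list):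
--         addr_clean = addr.strip().lower()
--         # Check if key parts of the address match
--         matches = sum(1 for part in address_parts if part in addr_clean)
--         if matches >= 2:  # At least 2 parts match
--             return i
--
--     return -1
-- ===== SOURCE B (Python) =====
-- def get_address_id(address, address_list):
--     """Finds the index (ID) for a given address string."""
--     if "4001 South 700 East" in address or "4001 S 700 E" in address:
--         return 0  # Hub is always index 0
--     address_clean = address.strip().lower()
--     address_parts = address_clean.split()
--     fallback = -1
--     # Single pass: a substring match returns immediately; the first
--     # >=2-parts match is only recorded, since any later substring match
--     # must still win globally.
--     for i, addr in enumerate(address_list):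
--         addr_clean = addr.strip().lower()
--         if address_clean in addr_clean or addr_clean in address_clean:
--             return i
--         if fallback == -1 and sum(part in addr_clean for part in address_parts) >= 2:
--             fallback = i
--     return fallback
-- ===== Notes on version B (the rewrite author's own statement) =====
-- stated objective: alternative
-- what changed: Fuses A's two enumeration passes (substring pass, then parts-match pass) into a single pass that returns on a substring match and merely records the first parts-match index as a fallback.
import Mathlib
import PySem

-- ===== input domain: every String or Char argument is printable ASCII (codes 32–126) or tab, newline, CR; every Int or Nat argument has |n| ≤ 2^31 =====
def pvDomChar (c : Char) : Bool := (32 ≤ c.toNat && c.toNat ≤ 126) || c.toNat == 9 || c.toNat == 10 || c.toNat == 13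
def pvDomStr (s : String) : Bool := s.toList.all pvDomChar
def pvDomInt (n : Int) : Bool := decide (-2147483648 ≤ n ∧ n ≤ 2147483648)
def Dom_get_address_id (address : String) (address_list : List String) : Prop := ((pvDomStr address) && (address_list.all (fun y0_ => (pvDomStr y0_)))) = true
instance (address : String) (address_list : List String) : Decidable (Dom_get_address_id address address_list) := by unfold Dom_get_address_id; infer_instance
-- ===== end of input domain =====

-- B fuses A's two enumeration passes into one pass with a recorded fallback index.

-- ===== PORT A =====
-- first loop: substring match in either direction
def pvALoop1 (ac : String) : List (Int × String) → Option Int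
  | [] => none
  | (i, addr) :: rest =>
    let addr_clean := PySem.Str.lower (PySem.Str.strip addr)
    if PySem.Str.isIn ac addr_clean || PySem.Str.isIn addr_clean ac then some i
    else pvALoop1 ac rest

-- matches = sum(1 for part in address_parts if part in addr_clean)
def pvACount (parts : List String) (addr_clean : String) : Int :=
  (parts.map (fun part => if PySem.Str.isIn part addr_clean then (1 : Int) else 0)).sum

-- second loop: at least 2 parts match
def pvALoop2 (parts : List String) : List (Int × String) → Int
  | [] => -1
  | (i, addr) :: rest =>
    let addr_clean := PySem.Str.lower (PySem.Str.strip addr)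
    if 2 ≤ pvACount parts addr_clean then i
    else pvALoop2 parts rest

def get_address_id (address : String) (address_list : List String) : Int :=
  if PySem.Str.isIn "4001 South 700 East" address || PySem.Str.isIn "4001 S 700 E" address then 0
  else
    let address_clean := PySem.Str.lower (PySem.Str.strip address)
    match pvALoop1 address_clean (PySem.List.enumerate address_list) with
    | some i => i
    | none =>
      let address_parts := PySem.Str.split₀ address_clean
      pvALoop2 address_parts (PySem.List.enumerate address_list)

-- ===== PORT B =====
-- single fused loop carrying the fallback index
def pvBLoop (ac : String) (parts : List String) (fallback : Int) :
    List (Int × String) → Int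
  | [] => fallback
  | (i, addr) :: rest =>
    let addr_clean := PySem.Str.lower (PySem.Str.strip addr)
    if PySem.Str.isIn ac addr_clean || PySem.Str.isIn addr_clean ac then i
    else if fallback = -1 ∧ 2 ≤ (parts.countP (fun part => PySem.Str.isIn part addr_clean) : Int) then
      pvBLoop ac parts i rest
    else pvBLoop ac parts fallback rest

def get_address_id_alt (address : String) (address_list : List String) : Int :=
  if PySem.Str.isIn "4001 South 700 East" address || PySem.Str.isIn "4001 S 700 E" address then 0
  else
    let address_clean := PySem.Str.lower (PySem.Str.strip address)
    let address_parts := PySem.Str.split₀ address_clean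
    pvBLoop address_clean address_parts (-1) (PySem.List.enumerate address_list)

-- ===== PRECONDITION & SPEC =====
def Spec_get_address_id (address : String) (address_list : List String) (out : Int) : Prop := out = get_address_id_alt address address_list
instance (address : String) (address_list : List String) (out : Int) : Decidable (Spec_get_address_id address address_list out) := by unfold Spec_get_address_id; infer_instance

-- ===== CLAIM (what is proved, stated in full; the proofs are below) =====
def Claim_equal_get_address_id : Prop := ∀ (address : String) (address_list : List String), Dom_get_address_id address address_list → Spec_get_address_id address address_list (get_address_id address address_list)

-- ===== LEMMAS AND PROOFS =====

-- a sum of if-1-else-0 over a list is its countP, as Int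
theorem pvSumIte_eq_countP {α : Type} (p : α → Bool) (l : List α) :
    (l.map (fun x => if p x then (1 : Int) else 0)).sum = (l.countP p : Int) := by
  induction l with
  | nil => simp
  | cons x xs ih =>
    rw [List.map_cons, List.sum_cons, List.countP_cons, ih]
    by_cases h : p x <;> simp [h] <;> omega

-- A's generator-sum of 1s equals B's countP, as Int
theorem pvACount_eq_countP (parts : List String) (c : String) :
    pvACount parts c = (parts.countP (fun part => PySem.Str.isIn part c) : Int) :=
  pvSumIte_eq_countP _ parts

-- once a fallback ≥ 0 is recorded, B's loop returns it unless a substring match appears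
theorem pvBLoop_found (ac : String) (parts : List String) (f : Int) (hf : 0 ≤ f)
    (es : List (Int × String)) :
    pvBLoop ac parts f es = (match pvALoop1 ac es with | some i => i | none => f) := by
  induction es with
  | nil => simp [pvBLoop, pvALoop1]
  | cons e rest ih =>
    obtain ⟨i, addr⟩ := e
    simp only [pvBLoop, pvALoop1]
    split
    · rfl
    · have hne : ¬ (f = -1 ∧ 2 ≤ (parts.countP (fun part => PySem.Str.isIn part (PySem.Str.lower (PySem.Str.strip addr))) : Int)) := by
        rintro ⟨h1, -⟩; omega
      simp only [if_neg hne, ih]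

-- B's fused loop computes A's two passes (fallback still unset)
theorem pvBLoop_unset (ac : String) (parts : List String)
    (es : List (Int × String)) (hpos : ∀ p ∈ es, 0 ≤ p.1) :
    pvBLoop ac parts (-1) es =
      (match pvALoop1 ac es with | some i => i | none => pvALoop2 parts es) := by
  induction es with
  | nil => simp [pvBLoop, pvALoop1, pvALoop2]
  | cons e rest ih =>
    obtain ⟨i, addr⟩ := e
    have hi : 0 ≤ i := hpos (i, addr) (by simp)
    have hrest : ∀ p ∈ rest, 0 ≤ p.1 := fun p hp => hpos p (by simp [hp])
    simp only [pvBLoop, pvALoop1, pvALoop2]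
    split
    · rfl
    · rw [← pvACount_eq_countP]
      by_cases hcnt : 2 ≤ pvACount parts (PySem.Str.lower (PySem.Str.strip addr))
      · rw [if_pos ⟨by trivial, hcnt⟩, if_pos hcnt, pvBLoop_found ac parts i hi rest]
      · rw [if_neg (by rintro ⟨-, h⟩; exact hcnt h), if_neg hcnt, ih hrest]

-- ===== VERDICT (by name: the statement is the Claim_ definition above) =====
theorem get_address_id_spec : Claim_equal_get_address_id := by
  intro address address_list _
  unfold Spec_get_address_id get_address_id get_address_id_alt
  split
  · rfl
  · rw [pvBLoop_unset]
    intro p hp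
    rw [PySem.List.mem_enumerate_iff] at hp
    obtain ⟨k, hk, rfl⟩ := hp
    simp
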